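-- pv_equiv track=rewrite | github.com/Marcu21/UBB-INFO | An 1/Semestrul 1/Fundamentele Programarii/Lab 3/pythonLab3/main.py | secventa_maxima_dif_2prime
-- ===== SOURCE A (Python) =====
-- def este_prim(numar: int):
--     if numar < 2: return 0
--     if numar == 2: return 1
--     if numar % 2 == 0: return 0
--     for i in range(3,numar//2 + 1,2):
--         if numar % i == 0: return 0
--
--     return 1
--
-- def  secventa_maxima_dif_2prime(lista: int,dimensiune_lista: int):
--
--     """
--     1 5 8 10 11 20
--       + +  +  +  +
--     """
--     lista_secventa_maxima = []
--     lista_secventa_curenta = []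
--     secventa_curenta = 0
--     secventa_maxima = -1
--
--
--     for i in range(dimensiune_lista-1):
--         if este_prim(abs(lista[i]-lista[i+1])):
--             if secventa_curenta == 0:
--                 lista_secventa_curenta.append(lista[i])
--                 secventa_curenta += 1
--
--             lista_secventa_curenta.append(lista[i+1])
--             secventa_curenta +=1
--
--             if secventa_curenta > secventa_maxima:
--                 lista_secventa_maxima.clear()
--                 lista_secventa_maxima = lista_secventa_curenta [:]
--                 secventa_maxima = secventa_curenta
--
--         else:
--             secventa_curenta=0
--             lista_secventa_curenta.clear()
--
--     return lista_secventa_maxima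
-- ===== SOURCE B (Python) =====
-- def _este_prim_sqrt(n):
--     # trial division up to sqrt(n)
--     if n < 2:
--         return False
--     if n % 2 == 0:
--         return n == 2
--     d = 3
--     while d * d <= n:
--         if n % d == 0:
--             return False
--         d += 2
--     return True
--
--
-- def secventa_maxima_dif_2prime(lista, dimensiune_lista):
--     # track runs by index only; result is a single slice at the end
--     best_start = 0
--     best_len = 0
--     start = 0
--     for i in range(dimensiune_lista - 1):
--         if _este_prim_sqrt(abs(lista[i] - lista[i + 1])):
--             if i + 2 - start > best_len:
--                 best_start = start
--                 best_len = i + 2 - start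
--         else:
--             start = i + 1
--     return lista[best_start:best_start + best_len]
-- ===== Notes on version B (the rewrite author's own statement) =====
-- stated objective: faster
-- what changed: B tests primality by trial division only up to sqrt (while d*d<=n) instead of up to n//2, and tracks the best run by start index and length only, returning one slice at the end instead of building and copying element lists during the scan.
import Mathlib
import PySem

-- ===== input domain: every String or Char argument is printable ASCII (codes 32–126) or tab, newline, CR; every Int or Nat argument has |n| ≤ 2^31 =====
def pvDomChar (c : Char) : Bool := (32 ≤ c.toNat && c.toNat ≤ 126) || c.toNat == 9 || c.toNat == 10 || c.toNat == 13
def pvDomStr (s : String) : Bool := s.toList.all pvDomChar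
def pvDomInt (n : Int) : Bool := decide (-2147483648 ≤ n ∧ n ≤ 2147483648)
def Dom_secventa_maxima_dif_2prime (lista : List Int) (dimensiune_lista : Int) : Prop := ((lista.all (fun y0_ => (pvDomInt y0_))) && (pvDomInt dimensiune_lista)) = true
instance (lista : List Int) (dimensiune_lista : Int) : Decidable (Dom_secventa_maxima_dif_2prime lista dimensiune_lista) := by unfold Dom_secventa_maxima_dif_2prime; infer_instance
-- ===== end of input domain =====

-- B replaces A's trial division up to n//2 by trial division up to sqrt(n), and replaces A's
-- list-building/copying run tracking by index arithmetic with a single slice at the end.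

-- ===== PORT A =====
def este_prim (numar : Int) : Int :=
  if numar < 2 then 0
  else if numar = 2 then 1
  else if PySem.Int.mod numar 2 = 0 then 0
  else if (PySem.List.pyRange 3 (PySem.Int.floordiv numar 2 + 1) 2).any
            (fun i => PySem.Int.mod numar i == 0) then 0
  else 1

-- one iteration of A's for-loop; state = (lista_secventa_maxima, lista_secventa_curenta, secventa_curenta, secventa_maxima)
def pasA (lista : List Int) (st : List Int × List Int × Int × Int) (i : Int) :
    List Int × List Int × Int × Int :=
  let maxL := st.1
  let curL := st.2.1
  let cur := st.2.2.1
  let maxl := st.2.2.2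
  if este_prim (((PySem.List.pyGetD lista i 0) - (PySem.List.pyGetD lista (i + 1) 0)).natAbs : Int) ≠ 0 then
    let p := if cur = 0 then (curL ++ [PySem.List.pyGetD lista i 0], cur + 1) else (curL, cur)
    let curL := p.1 ++ [PySem.List.pyGetD lista (i + 1) 0]
    let cur := p.2 + 1
    if cur > maxl then (curL, curL, cur, cur) else (maxL, curL, cur, maxl)
  else (maxL, [], 0, maxl)

def secventa_maxima_dif_2prime (lista : List Int) (dimensiune_lista : Int) : List Int :=
  ((PySem.List.pyRange 0 (dimensiune_lista - 1) 1).foldl (pasA lista) ([], [], 0, -1)).1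

-- ===== PORT B =====
-- while d*d <= n: if n % d == 0: return False; d += 2
def primeLoopB (n d : Int) : Bool :=
  if _h : d * d ≤ n then
    if PySem.Int.mod n d = 0 then false else primeLoopB n (d + 2)
  else true
termination_by (n + 2 - d).toNat
decreasing_by
  have hd : d ≤ n := by nlinarith [sq_nonneg d, sq_nonneg (d - 1)]
  omega

def este_prim_sqrt (n : Int) : Bool :=
  if n < 2 then false
  else if PySem.Int.mod n 2 = 0 then n == 2
  else primeLoopB n 3

-- one iteration of B's for-loop; state = (best_start, best_len, start)
def pasB (lista : List Int) (st : Int × Int × Int) (i : Int) : Int × Int × Int :=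
  if este_prim_sqrt (((PySem.List.pyGetD lista i 0) - (PySem.List.pyGetD lista (i + 1) 0)).natAbs : Int) then
    if i + 2 - st.2.2 > st.2.1 then (st.2.2, i + 2 - st.2.2, st.2.2) else st
  else (st.1, st.2.1, i + 1)

def secventa_maxima_dif_2prime_alt (lista : List Int) (dimensiune_lista : Int) : List Int :=
  let st := (PySem.List.pyRange 0 (dimensiune_lista - 1) 1).foldl (pasB lista) (0, 0, 0)
  PySem.List.slice lista (some st.1) (some (st.1 + st.2.1))

-- ===== PRECONDITION & SPEC =====
-- Pre_ excludes exactly the inputs on which A raises IndexError: dimensiune_lista larger than the list length.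
def Pre_secventa_maxima_dif_2prime (lista : List Int) (dimensiune_lista : Int) : Prop :=
  dimensiune_lista ≤ (lista.length : Int)
instance (lista : List Int) (dimensiune_lista : Int) : Decidable (Pre_secventa_maxima_dif_2prime lista dimensiune_lista) := by unfold Pre_secventa_maxima_dif_2prime; infer_instance

def pvWitness_secventa_maxima_dif_2prime : List Int × Int := ([1, 3, 10], 3)

def Spec_secventa_maxima_dif_2prime (lista : List Int) (dimensiune_lista : Int) (out : List Int) : Prop := out = secventa_maxima_dif_2prime_alt lista dimensiune_lista
instance (lista : List Int) (dimensiune_lista : Int) (out : List Int) : Decidable (Spec_secventa_maxima_dif_2prime lista dimensiune_lista out) := by unfold Spec_secventa_maxima_dif_2prime; infer_instance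

-- ===== CLAIM (what is proved, stated in full; the proofs are below) =====
def Claim_equal_secventa_maxima_dif_2prime : Prop := ∀ (lista : List Int) (dimensiune_lista : Int), Dom_secventa_maxima_dif_2prime lista dimensiune_lista → Pre_secventa_maxima_dif_2prime lista dimensiune_lista → Spec_secventa_maxima_dif_2prime lista dimensiune_lista (secventa_maxima_dif_2prime lista dimensiune_lista)

-- ===== LEMMAS AND PROOFS =====

-- the element lista[j] for a natural index j (proof-side abbreviation)
def xval (lista : List Int) (j : Nat) : Int := PySem.List.pyGetD lista (j : Int) 0

-- B's while-loop finds a divisor iff an odd-offset divisor e with e*e ≤ n exists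
theorem primeLoopB_false_iff (n d : Int) (hd : 1 ≤ d) :
    primeLoopB n d = false ↔ ∃ e : Int, d ≤ e ∧ 2 ∣ e - d ∧ e * e ≤ n ∧ e ∣ n := by
  revert hd
  induction d using primeLoopB.induct (n := n) with
  | case1 d h hmod =>
    intro _
    rw [primeLoopB]
    simp only [dif_pos h, if_pos hmod, true_iff]
    exact ⟨d, le_refl d, by simp, h, (PySem.Int.mod_eq_zero_iff_dvd n d).1 hmod⟩
  | case2 d h hmod ih =>
    intro hd
    rw [primeLoopB]
    simp only [dif_pos h, if_neg hmod]
    rw [ih (by omega)]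
    constructor
    · rintro ⟨e, he, hpar, hee, hdvd⟩
      exact ⟨e, by omega, by omega, hee, hdvd⟩
    · rintro ⟨e, he, hpar, hee, hdvd⟩
      have hne : e ≠ d := by
        intro hE; subst hE
        exact hmod ((PySem.Int.mod_eq_zero_iff_dvd n e).2 hdvd)
      exact ⟨e, by omega, by omega, hee, hdvd⟩
  | case3 d h =>
    intro hd
    rw [primeLoopB]
    simp only [dif_neg h]
    constructor
    · intro hfalse; simp at hfalse
    · rintro ⟨e, he, _, hee, _⟩
      exfalso
      have h1 : d * d ≤ e * e := by nlinarith
      omega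

-- a proper divisor 2 ≤ d < m refutes primality
theorem comp_of_divisor (m d : Nat) (hd : 2 ≤ d) (hlt : d < m) (hdvd : d ∣ m) : ¬ m.Prime := by
  intro hp
  have := (Nat.prime_def_lt.1 hp).2 d hlt hdvd
  omega

-- a composite odd m ≥ 3 has an odd prime factor p with p*p ≤ m and 2*p ≤ m
theorem odd_comp_witness (m : Nat) (h3 : 3 ≤ m) (hodd : m % 2 = 1) (hnp : ¬ m.Prime) :
    ∃ p : Nat, 3 ≤ p ∧ p % 2 = 1 ∧ p * p ≤ m ∧ 2 * p ≤ m ∧ p ∣ m := by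
  have hp := Nat.minFac_prime (show m ≠ 1 by omega)
  have hdvd := Nat.minFac_dvd m
  have h2le := hp.two_le
  have hne2 : m.minFac ≠ 2 := by
    intro h
    have h2m : 2 ∣ m := h ▸ hdvd
    omega
  have hoddp : m.minFac % 2 = 1 := by
    rcases Nat.mod_two_eq_zero_or_one m.minFac with h | h
    · exfalso
      have h2p : 2 ∣ m.minFac := Nat.dvd_of_mod_eq_zero h
      rcases hp.eq_one_or_self_of_dvd 2 h2p with h1 | h1 <;> omega
    · exact h
  have hsq : m.minFac * m.minFac ≤ m := by
    have := Nat.minFac_sq_le_self (show 0 < m by omega) hnp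
    nlinarith
  exact ⟨m.minFac, by omega, hoddp, hsq, by nlinarith, hdvd⟩

-- the two primality tests decide the same predicate on naturals
theorem prime_test_agree (m : Nat) :
    (este_prim (m : Int) ≠ 0) ↔ este_prim_sqrt (m : Int) = true := by
  by_cases h0 : m < 2
  · have hlt : (m : Int) < 2 := by omega
    simp [este_prim, este_prim_sqrt, hlt]
  by_cases h2 : m = 2
  · subst h2; decide
  by_cases he : m % 2 = 0
  · have c1 : ¬((m : Int) < 2) := by omega
    have c2 : (m : Int) ≠ 2 := by omega
    have c3 : PySem.Int.mod (m : Int) 2 = 0 := by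
      rw [show (2:Int) = ((2:Nat):Int) from rfl, PySem.Int.mod_natCast]
      omega
    have hA0 : este_prim (m : Int) = 0 := by
      unfold este_prim
      rw [if_neg c1, if_neg c2, if_pos c3]
    have hB0 : este_prim_sqrt (m : Int) = false := by
      unfold este_prim_sqrt
      rw [if_neg c1, if_pos c3]
      simp [c2]
    rw [hA0, hB0]
    simp
  -- odd m ≥ 3
  have h3 : 3 ≤ m := by omega
  have hodd : m % 2 = 1 := by omega
  have c1 : ¬((m : Int) < 2) := by omega
  have c2 : (m : Int) ≠ 2 := by omega
  have c3 : ¬(PySem.Int.mod (m : Int) 2 = 0) := by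
    rw [show (2:Int) = ((2:Nat):Int) from rfl, PySem.Int.mod_natCast]
    omega
  have hAiff : ((PySem.List.pyRange 3 (PySem.Int.floordiv (m : Int) 2 + 1) 2).any
      (fun i => PySem.Int.mod (m : Int) i == 0) = true) ↔
      (∃ i : Int, 3 ≤ i ∧ i < ((m / 2 : Nat) : Int) + 1 ∧ 2 ∣ i - 3 ∧ i ∣ (m : Int)) := by
    rw [List.any_eq_true]
    rw [show PySem.Int.floordiv (m : Int) 2 = ((m / 2 : Nat) : Int) by
      rw [show (2:Int) = ((2:Nat):Int) from rfl, PySem.Int.floordiv_natCast]]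
    constructor
    · rintro ⟨i, hmem, hdiv⟩
      obtain ⟨ha, hb, hc⟩ := (PySem.List.mem_pyRange_iff_of_pos (by norm_num) i).1 hmem
      exact ⟨i, ha, hb, hc, (PySem.Int.mod_eq_zero_iff_dvd _ _).1 (by simpa using hdiv)⟩
    · rintro ⟨i, ha, hb, hc, hdvd⟩
      refine ⟨i, (PySem.List.mem_pyRange_iff_of_pos (by norm_num) i).2 ⟨ha, hb, hc⟩, ?_⟩
      simpa using (PySem.Int.mod_eq_zero_iff_dvd (m : Int) i).2 hdvd
  have hBiff : (primeLoopB (m : Int) 3 = false) ↔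
      (∃ e : Int, 3 ≤ e ∧ 2 ∣ e - 3 ∧ e * e ≤ (m : Int) ∧ e ∣ (m : Int)) :=
    primeLoopB_false_iff (m : Int) 3 (by norm_num)
  have hnpA : (∃ i : Int, 3 ≤ i ∧ i < ((m / 2 : Nat) : Int) + 1 ∧ 2 ∣ i - 3 ∧ i ∣ (m : Int)) ↔
      ¬ m.Prime := by
    constructor
    · rintro ⟨i, ha, hb, _, hdvd⟩
      have hlt : i.toNat < m := by omega
      apply comp_of_divisor m i.toNat (by omega) hlt
      rw [← Int.natCast_dvd_natCast]
      rw [show ((i.toNat : Nat) : Int) = i by omega]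
      exact hdvd
    · intro hnp
      obtain ⟨p, hp3, hpo, _, hp2, hpdvd⟩ := odd_comp_witness m h3 hodd hnp
      have hhalf : p ≤ m / 2 := (Nat.le_div_iff_mul_le (by norm_num)).2 (by omega)
      exact ⟨(p : Int), by omega, by omega, by omega, Int.natCast_dvd_natCast.2 hpdvd⟩
  have hnpB : (∃ e : Int, 3 ≤ e ∧ 2 ∣ e - 3 ∧ e * e ≤ (m : Int) ∧ e ∣ (m : Int)) ↔
      ¬ m.Prime := by
    constructor
    · rintro ⟨e, ha, _, hee, hdvd⟩
      have hee' : e.toNat * e.toNat ≤ m := by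
        have h1 : ((e.toNat : Nat) : Int) = e := by omega
        have h2 := hee
        rw [← h1] at h2
        exact_mod_cast h2
      have hlt : e.toNat < m := by nlinarith [hee']
      apply comp_of_divisor m e.toNat (by omega) hlt
      rw [← Int.natCast_dvd_natCast]
      rw [show ((e.toNat : Nat) : Int) = e by omega]
      exact hdvd
    · intro hnp
      obtain ⟨p, hp3, hpo, hpp, _, hpdvd⟩ := odd_comp_witness m h3 hodd hnp
      refine ⟨(p : Int), by omega, by omega, ?_, Int.natCast_dvd_natCast.2 hpdvd⟩
      exact_mod_cast hpp
  have key : ((PySem.List.pyRange 3 (PySem.Int.floordiv (m : Int) 2 + 1) 2).any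
      (fun i => PySem.Int.mod (m : Int) i == 0) = true) ↔ primeLoopB (m : Int) 3 = false := by
    rw [hAiff, hBiff, hnpA, hnpB]
  unfold este_prim este_prim_sqrt
  rw [if_neg c1, if_neg c2, if_neg c3, if_neg c1, if_neg c3]
  by_cases hany : (PySem.List.pyRange 3 (PySem.Int.floordiv (m : Int) 2 + 1) 2).any
      (fun i => PySem.Int.mod (m : Int) i == 0) = true
  · rw [if_pos hany]
    have hpb := key.1 hany
    simp [hpb]
  · rw [if_neg hany]
    have hpb : primeLoopB (m : Int) 3 = true := by
      cases hx : primeLoopB (m : Int) 3 with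
      | false => exact absurd (key.2 hx) hany
      | true => rfl
    simp [hpb]

-- one step of B's loop, both branches
theorem pasB_no (lista : List Int) (a b s i : Int)
    (h : este_prim_sqrt (((PySem.List.pyGetD lista i 0) - (PySem.List.pyGetD lista (i + 1) 0)).natAbs : Int) = false) :
    pasB lista (a, b, s) i = (a, b, i + 1) := by
  simp only [pasB]
  rw [h]
  simp

theorem pasB_yes (lista : List Int) (a b s i : Int)
    (h : este_prim_sqrt (((PySem.List.pyGetD lista i 0) - (PySem.List.pyGetD lista (i + 1) 0)).natAbs : Int) = true) :
    pasB lista (a, b, s) i = if i + 2 - s > b then (s, i + 2 - s, s) else (a, b, s) := by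
  simp only [pasB]
  rw [h]
  simp

-- one step of A's loop, all three branches
theorem pasA_no (lista : List Int) (M C : List Int) (c m i : Int)
    (h : este_prim (((PySem.List.pyGetD lista i 0) - (PySem.List.pyGetD lista (i + 1) 0)).natAbs : Int) = 0) :
    pasA lista (M, C, c, m) i = (M, [], 0, m) := by
  simp only [pasA]
  rw [h]
  simp

theorem pasA_yes_zero (lista : List Int) (M C : List Int) (m i : Int)
    (h : este_prim (((PySem.List.pyGetD lista i 0) - (PySem.List.pyGetD lista (i + 1) 0)).natAbs : Int) ≠ 0) :
    pasA lista (M, C, 0, m) i =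
      if 2 > m then
        (C ++ [PySem.List.pyGetD lista i 0, PySem.List.pyGetD lista (i + 1) 0],
         C ++ [PySem.List.pyGetD lista i 0, PySem.List.pyGetD lista (i + 1) 0], 2, 2)
      else
        (M, C ++ [PySem.List.pyGetD lista i 0, PySem.List.pyGetD lista (i + 1) 0], 2, m) := by
  simp only [pasA]
  rw [if_pos h]
  norm_num

theorem pasA_yes_pos (lista : List Int) (M C : List Int) (c m i : Int)
    (h : este_prim (((PySem.List.pyGetD lista i 0) - (PySem.List.pyGetD lista (i + 1) 0)).natAbs : Int) ≠ 0)
    (hc : c ≠ 0) :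
    pasA lista (M, C, c, m) i =
      if c + 1 > m then
        (C ++ [PySem.List.pyGetD lista (i + 1) 0], C ++ [PySem.List.pyGetD lista (i + 1) 0], c + 1, c + 1)
      else
        (M, C ++ [PySem.List.pyGetD lista (i + 1) 0], c + 1, m) := by
  simp only [pasA]
  rw [if_pos h, if_neg hc]

-- the joint loop invariant: after k steps, A's lists are the segments B tracks by indices
theorem loop_inv (lista : List Int) (k : Nat) :
    ∃ bs bl st : Nat,
      (PySem.List.pyRange 0 (k : Int) 1).foldl (pasB lista) (0, 0, 0) = ((bs : Int), (bl : Int), (st : Int)) ∧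
      st ≤ k ∧ bs + bl ≤ k + 1 ∧ (bl = 0 → bs = 0) ∧ (bl = 0 ∨ 2 ≤ bl) ∧
      (PySem.List.pyRange 0 (k : Int) 1).foldl (pasA lista) ([], [], 0, -1) =
        ((List.range' bs bl).map (xval lista),
         (List.range' st (if st = k then 0 else k + 1 - st)).map (xval lista),
         (if st = k then (0 : Int) else ((k + 1 - st : Nat) : Int)),
         (if bl = 0 then (-1 : Int) else (bl : Int))) := by
  induction k with
  | zero =>
    refine ⟨0, 0, 0, ?_, le_refl 0, by omega, fun _ => rfl, Or.inl rfl, ?_⟩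
    · simp [PySem.List.pyRange_one_eq_nil]
    · simp [PySem.List.pyRange_one_eq_nil]
  | succ k ih =>
    obtain ⟨bs, bl, st, hB, hst, hlen, hbs0, hbl2, hA⟩ := ih
    have hsucc : ((k + 1 : Nat) : Int) = (k : Int) + 1 := by push_cast; ring
    rw [hsucc, PySem.List.pyRange_one_succ_right (Int.natCast_nonneg k),
        List.foldl_append, List.foldl_append, hA, hB]
    simp only [List.foldl_cons, List.foldl_nil]
    cases hpv : este_prim_sqrt (((PySem.List.pyGetD lista (k : Int) 0) -
        (PySem.List.pyGetD lista ((k : Int) + 1) 0)).natAbs : Int) with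
    | false =>
      have hAc : este_prim (((PySem.List.pyGetD lista (k : Int) 0) -
          (PySem.List.pyGetD lista ((k : Int) + 1) 0)).natAbs : Int) = 0 := by
        by_contra hne
        have h1 := (prime_test_agree _).1 hne
        rw [hpv] at h1
        exact Bool.noConfusion h1
      rw [pasA_no lista _ _ _ _ _ hAc, pasB_no lista _ _ _ _ hpv]
      refine ⟨bs, bl, k + 1, ?_, le_refl _, by omega, hbs0, hbl2, ?_⟩
      · rw [show ((k : Int) + 1) = ((k + 1 : Nat) : Int) by push_cast; ring]
      · simp
    | true =>
      have hAc : este_prim (((PySem.List.pyGetD lista (k : Int) 0) -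
          (PySem.List.pyGetD lista ((k : Int) + 1) 0)).natAbs : Int) ≠ 0 :=
        (prime_test_agree _).2 hpv
      rw [pasB_yes lista _ _ _ _ hpv]
      by_cases hstk : st = k
      · subst hstk
        rw [if_pos rfl, if_pos rfl]
        rw [show (List.range' st 0).map (xval lista) = [] from rfl]
        rw [pasA_yes_zero lista _ _ _ _ hAc]
        have hseg : (List.range' st 2).map (xval lista) =
            [] ++ [PySem.List.pyGetD lista (st : Int) 0, PySem.List.pyGetD lista ((st : Int) + 1) 0] := by
          simp only [List.range', List.map_cons, List.map_nil, List.nil_append, xval]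
          push_cast
          rfl
        by_cases hbl0 : bl = 0
        · have hbs := hbs0 hbl0
          subst hbl0
          subst hbs
          rw [if_pos (show (2:Int) > (if (0:Nat) = 0 then (-1:Int) else ((0:Nat):Int)) by simp)]
          rw [if_pos (show (st : Int) + 2 - (st : Int) > ((0:Nat) : Int) by push_cast; omega)]
          refine ⟨st, 2, st, ?_, by omega, by omega, by omega, by omega, ?_⟩
          · rw [show (st : Int) + 2 - (st : Int) = ((2:Nat) : Int) by push_cast; ring]
          · rw [if_neg (show ¬ st = st + 1 by omega), if_neg (show ¬ st = st + 1 by omega)]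
            rw [show st + 1 + 1 - st = 2 by omega, hseg]
            norm_num
        · have hbl : 2 ≤ bl := by omega
          rw [if_neg (show ¬((2:Int) > (if bl = 0 then (-1:Int) else (bl:Int))) by
            rw [if_neg hbl0]; omega)]
          rw [if_neg (show ¬((st : Int) + 2 - (st : Int) > (bl : Int)) by omega)]
          refine ⟨bs, bl, st, rfl, by omega, by omega, hbs0, hbl2, ?_⟩
          rw [if_neg (show ¬ st = st + 1 by omega), if_neg (show ¬ st = st + 1 by omega)]
          rw [show st + 1 + 1 - st = 2 by omega, hseg]
          norm_num
      · have hstlt : st < k := by omega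
        have hcurne : ¬(((k + 1 - st : Nat) : Int) = 0) := by omega
        rw [if_neg hstk, if_neg hstk]
        rw [pasA_yes_pos lista _ _ _ _ _ hAc hcurne]
        have hsnoc : (List.range' st (k + 2 - st)).map (xval lista)
            = (List.range' st (k + 1 - st)).map (xval lista)
              ++ [PySem.List.pyGetD lista ((k : Int) + 1) 0] := by
          rw [show k + 2 - st = (k + 1 - st) + 1 by omega, List.range'_concat, List.map_append]
          simp only [List.map_cons, List.map_nil]
          congr 2
          simp only [xval]
          congr 1
          omega
        by_cases hgt : bl < k + 2 - st
        · rw [if_pos (show ((k + 1 - st : Nat) : Int) + 1 >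
              (if bl = 0 then (-1:Int) else (bl : Int)) by split_ifs <;> omega)]
          rw [if_pos (show (k : Int) + 2 - (st : Int) > (bl : Int) by omega)]
          refine ⟨st, k + 2 - st, st, ?_, by omega, by omega, by omega, by omega, ?_⟩
          · rw [show (k : Int) + 2 - (st : Int) = ((k + 2 - st : Nat) : Int) by omega]
          · rw [if_neg (show ¬ st = k + 1 by omega), if_neg (show ¬ st = k + 1 by omega)]
            rw [show k + 1 + 1 - st = k + 2 - st by omega, hsnoc]
            rw [if_neg (show ¬(k + 2 - st = 0) by omega)]
            rw [show ((k + 2 - st : Nat) : Int) = ((k + 1 - st : Nat) : Int) + 1 by omega]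
        · rw [if_neg (show ¬(((k + 1 - st : Nat) : Int) + 1 >
              (if bl = 0 then (-1:Int) else (bl : Int))) by
            rw [if_neg (show ¬ bl = 0 by omega)]; omega)]
          rw [if_neg (show ¬((k : Int) + 2 - (st : Int) > (bl : Int)) by omega)]
          refine ⟨bs, bl, st, rfl, by omega, by omega, hbs0, hbl2, ?_⟩
          rw [if_neg (show ¬ st = k + 1 by omega), if_neg (show ¬ st = k + 1 by omega)]
          rw [show k + 1 + 1 - st = k + 2 - st by omega, hsnoc]
          rw [show ((k + 1 + 1 - st : Nat) : Int) = ((k + 1 - st : Nat) : Int) + 1 by omega]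

-- a segment read element by element is the corresponding slice
theorem map_range'_eq_take_drop (lista : List Int) (bs bl : Nat) (h : bs + bl ≤ lista.length) :
    (List.range' bs bl).map (xval lista) = (lista.drop bs).take bl := by
  apply List.ext_getElem
  · simp
    omega
  · intro i h1 h2
    have h3 : i < bl := by simpa using h1
    simp only [List.getElem_map, List.getElem_range']
    rw [List.getElem_take, List.getElem_drop]
    simp only [xval, PySem.List.pyGetD_natCast]
    rw [List.getD_eq_getElem lista 0 (show bs + 1 * i < lista.length by omega)]
    congr 1
    omega

-- ===== VERDICT (by name: the statement is the Claim_ definition above) =====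
theorem secventa_maxima_dif_2prime_spec : Claim_equal_secventa_maxima_dif_2prime := by
  intro lista dim _hdom hpre
  unfold Spec_secventa_maxima_dif_2prime secventa_maxima_dif_2prime secventa_maxima_dif_2prime_alt
  have hrange : PySem.List.pyRange 0 (dim - 1) 1 = PySem.List.pyRange 0 (((dim - 1).toNat : Nat) : Int) 1 := by
    by_cases h : dim ≤ 1
    · rw [PySem.List.pyRange_one_eq_nil (by omega), PySem.List.pyRange_one_eq_nil (by omega)]
    · congr 1
      omega
  rw [hrange]
  obtain ⟨bs, bl, st, hB, _hst, hlen, hbs0, hbl2, hA⟩ := loop_inv lista (dim - 1).toNat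
  rw [hA, hB]
  have hbl : bs + bl ≤ lista.length := by
    unfold Pre_secventa_maxima_dif_2prime at hpre
    rcases hbl2 with h0 | h0
    · have := hbs0 h0; omega
    · omega
  simp only [map_range'_eq_take_drop lista bs bl hbl]
  exact (PySem.List.slice_natCast_add lista bs bl).symm
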